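-- pv_equiv track=rewrite | github.com/lbwry782-star/ACE-Backend | engine/ace_engine.py | derive_environment_for_object
-- ===== SOURCE A (Python) =====
-- def derive_environment_for_object(obj_name: str) -> str:
--     """
--     Derive minimal environment for an object (deterministic mapping).
--
--     Object Environment Rule:
--     - Maps common objects to minimal environments
--     - Returns "neutral studio surface" if no match found
--     - Environment must not include text, signage, symbols, or narrative contexts
--
--     Args:
--         obj_name: Name of the object
--
--     Returns:
--         Environment string (minimal, non-narrative)
--     """
--     obj_lower = obj_name.lower()
--
--     # Water/liquid objects
--     if any(kw in obj_lower for kw in ["water", "dew", "rain", "snow", "ice", "frost", "mist", "fog", "ocean", "sea", "lake", "river", "stream", "pond", "pool", "fountain", "spring"]):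
--         return "water surface"
--
--     # Bedding/comfort objects
--     if any(kw in obj_lower for kw in ["pillow", "cushion", "mattress", "blanket", "quilt", "comforter", "duvet", "sheet", "bed", "hammock"]):
--         return "bedding"
--
--     # Desk/table objects
--     if any(kw in obj_lower for kw in ["desk", "table", "workbench", "bench", "counter", "surface"]):
--         return "desk"
--
--     # Tool/mechanical objects
--     if any(kw in obj_lower for kw in ["tool", "gear", "cog", "wheel", "pulley", "lever", "mechanism", "machine", "engine", "motor", "turbine", "generator", "wrench", "screwdriver", "hammer"]):
--         return "tabletop"
--
--     # Writing/paper objects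
--     if any(kw in obj_lower for kw in ["book", "notebook", "journal", "paper", "document", "letter", "pen", "pencil"]):
--         return "desk"
--
--     # Food objects
--     if any(kw in obj_lower for kw in ["fruit", "vegetable", "herb", "spice", "grain", "seed", "nut", "berry", "food"]):
--         return "tabletop"
--
--     # Nature/plant objects
--     if any(kw in obj_lower for kw in ["leaf", "flower", "bud", "sprout", "seedling", "sapling", "blossom", "bloom", "tree", "plant"]):
--         return "tabletop"
--
--     # Glass/crystal objects
--     if any(kw in obj_lower for kw in ["glass", "crystal", "lens", "mirror", "prism", "diamond", "gem", "pearl"]):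
--         return "tabletop"
--
--     # Metal/stone objects
--     if any(kw in obj_lower for kw in ["steel", "iron", "metal", "stone", "rock", "brick", "marble", "granite", "diamond", "titanium"]):
--         return "tabletop"
--
--     # Fabric/textile objects
--     if any(kw in obj_lower for kw in ["fabric", "cloth", "textile", "robe", "pajamas", "sweater", "cardigan", "hoodie", "jacket", "socks", "slippers"]):
--         return "bedding"
--
--     # Default: neutral studio surface
--     return "neutral studio surface"
-- ===== SOURCE B (Python) =====
-- _GROUPS = [
--     (["water", "dew", "rain", "snow", "ice", "frost", "mist", "fog", "ocean", "sea", "lake", "river", "stream", "pond", "pool", "fountain", "spring"], "water surface"),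
--     (["pillow", "cushion", "mattress", "blanket", "quilt", "comforter", "duvet", "sheet", "bed", "hammock"], "bedding"),
--     (["desk", "table", "workbench", "bench", "counter", "surface"], "desk"),
--     (["tool", "gear", "cog", "wheel", "pulley", "lever", "mechanism", "machine", "engine", "motor", "turbine", "generator", "wrench", "screwdriver", "hammer"], "tabletop"),
--     (["book", "notebook", "journal", "paper", "document", "letter", "pen", "pencil"], "desk"),
--     (["fruit", "vegetable", "herb", "spice", "grain", "seed", "nut", "berry", "food"], "tabletop"),
--     (["leaf", "flower", "bud", "sprout", "seedling", "sapling", "blossom", "bloom", "tree", "plant"], "tabletop"),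
--     (["glass", "crystal", "lens", "mirror", "prism", "diamond", "gem", "pearl"], "tabletop"),
--     (["steel", "iron", "metal", "stone", "rock", "brick", "marble", "granite", "diamond", "titanium"], "tabletop"),
--     (["fabric", "cloth", "textile", "robe", "pajamas", "sweater", "cardigan", "hoodie", "jacket", "socks", "slippers"], "bedding"),
-- ]
--
-- # Inverted index: keyword -> priority (group index); first insertion wins.
-- _KW = {}
-- for _pri, (_kws, _env) in enumerate(_GROUPS):
--     for _kw in _kws:
--         _KW.setdefault(_kw, _pri)
-- _ENVS = [env for _, env in _GROUPS]
-- _LENS = sorted({len(k) for k in _KW})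
--
--
-- def derive_environment_for_object(obj_name: str) -> str:
--     # Enumerate substrings of the lowered name (keyword lengths only), look each
--     # up in the inverted index, and return the environment of the best priority.
--     s = obj_name.lower()
--     pris = [_KW[sub] for i in range(len(s) + 1) for L in _LENS
--             if (sub := s[i:i + L]) in _KW]
--     return _ENVS[min(pris)] if pris else "neutral studio surface"
-- ===== Notes on version B (the rewrite author's own statement) =====
-- stated objective: alternative
-- what changed: Replaces the per-keyword substring scans of eleven unrolled any-branches by an inverted index: a keyword->priority dict built once from the groups; B enumerates the substrings of the lowered name (keyword lengths only), looks each up in the dict, and returns the environment of the minimal matched priority.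
import Mathlib
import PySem

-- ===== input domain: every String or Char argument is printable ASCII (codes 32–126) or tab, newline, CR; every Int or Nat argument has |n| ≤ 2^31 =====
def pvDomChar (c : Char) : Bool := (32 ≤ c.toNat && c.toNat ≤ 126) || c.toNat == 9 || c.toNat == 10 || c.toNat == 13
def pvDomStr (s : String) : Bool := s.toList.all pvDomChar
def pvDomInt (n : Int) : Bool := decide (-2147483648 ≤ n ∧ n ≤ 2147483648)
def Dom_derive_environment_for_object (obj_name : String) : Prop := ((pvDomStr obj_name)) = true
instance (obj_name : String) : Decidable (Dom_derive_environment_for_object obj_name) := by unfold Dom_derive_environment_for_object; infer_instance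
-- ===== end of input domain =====

-- B replaces A's eleven unrolled any-over-keywords branches by an inverted index: it enumerates the
-- substrings of the lowered name (keyword lengths only), looks each up in a keyword -> priority dict
-- built once from the groups, and returns the environment of the minimal matched priority (objective: alternative).


-- ===== PORT A =====
def derive_environment_for_object (obj_name : String) : String :=
  let obj_lower := PySem.Str.lower obj_name
  if (["water", "dew", "rain", "snow", "ice", "frost", "mist", "fog", "ocean", "sea", "lake", "river", "stream", "pond", "pool", "fountain", "spring"].any (fun kw => PySem.Str.isIn kw obj_lower)) then "water surface"
  else if (["pillow", "cushion", "mattress", "blanket", "quilt", "comforter", "duvet", "sheet", "bed", "hammock"].any (fun kw => PySem.Str.isIn kw obj_lower)) then "bedding"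
  else if (["desk", "table", "workbench", "bench", "counter", "surface"].any (fun kw => PySem.Str.isIn kw obj_lower)) then "desk"
  else if (["tool", "gear", "cog", "wheel", "pulley", "lever", "mechanism", "machine", "engine", "motor", "turbine", "generator", "wrench", "screwdriver", "hammer"].any (fun kw => PySem.Str.isIn kw obj_lower)) then "tabletop"
  else if (["book", "notebook", "journal", "paper", "document", "letter", "pen", "pencil"].any (fun kw => PySem.Str.isIn kw obj_lower)) then "desk"
  else if (["fruit", "vegetable", "herb", "spice", "grain", "seed", "nut", "berry", "food"].any (fun kw => PySem.Str.isIn kw obj_lower)) then "tabletop"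
  else if (["leaf", "flower", "bud", "sprout", "seedling", "sapling", "blossom", "bloom", "tree", "plant"].any (fun kw => PySem.Str.isIn kw obj_lower)) then "tabletop"
  else if (["glass", "crystal", "lens", "mirror", "prism", "diamond", "gem", "pearl"].any (fun kw => PySem.Str.isIn kw obj_lower)) then "tabletop"
  else if (["steel", "iron", "metal", "stone", "rock", "brick", "marble", "granite", "diamond", "titanium"].any (fun kw => PySem.Str.isIn kw obj_lower)) then "tabletop"
  else if (["fabric", "cloth", "textile", "robe", "pajamas", "sweater", "cardigan", "hoodie", "jacket", "socks", "slippers"].any (fun kw => PySem.Str.isIn kw obj_lower)) then "bedding"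
  else "neutral studio surface"

-- ===== PORT B =====
def pvGroups : List (List String × String) :=
  [ (["water", "dew", "rain", "snow", "ice", "frost", "mist", "fog", "ocean", "sea", "lake", "river", "stream", "pond", "pool", "fountain", "spring"], "water surface"),
    (["pillow", "cushion", "mattress", "blanket", "quilt", "comforter", "duvet", "sheet", "bed", "hammock"], "bedding"),
    (["desk", "table", "workbench", "bench", "counter", "surface"], "desk"),
    (["tool", "gear", "cog", "wheel", "pulley", "lever", "mechanism", "machine", "engine", "motor", "turbine", "generator", "wrench", "screwdriver", "hammer"], "tabletop"),
    (["book", "notebook", "journal", "paper", "document", "letter", "pen", "pencil"], "desk"),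
    (["fruit", "vegetable", "herb", "spice", "grain", "seed", "nut", "berry", "food"], "tabletop"),
    (["leaf", "flower", "bud", "sprout", "seedling", "sapling", "blossom", "bloom", "tree", "plant"], "tabletop"),
    (["glass", "crystal", "lens", "mirror", "prism", "diamond", "gem", "pearl"], "tabletop"),
    (["steel", "iron", "metal", "stone", "rock", "brick", "marble", "granite", "diamond", "titanium"], "tabletop"),
    (["fabric", "cloth", "textile", "robe", "pajamas", "sweater", "cardigan", "hoodie", "jacket", "socks", "slippers"], "bedding") ]

-- inverted index keyword -> priority (group index); setdefault: first insertion wins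
def pvKW : PySem.Dict String Int :=
  (PySem.List.enumerate pvGroups).foldl
    (fun d pg => pg.2.1.foldl (fun d kw => d.setdefault kw pg.1) d)
    PySem.Dict.empty

def pvENVS : List String := pvGroups.map (fun g => g.2)

def pvLENS : List Int :=
  PySem.List.sorted ((PySem.Set.ofList ((PySem.Dict.keys pvKW).map PySem.Str.len)) : List Int) (fun x => x)

-- the comprehension [_KW[sub] for i in range(len(s)+1) for L in _LENS if (sub := s[i:i+L]) in _KW]
def pvPris (s : String) : List Int :=
  (PySem.List.pyRange 0 (PySem.Str.len s + 1)).flatMap (fun i =>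
    pvLENS.filterMap (fun L => PySem.Dict.get? pvKW (PySem.Str.slice s (some i) (some (i + L)))))

def derive_environment_for_object_alt (obj_name : String) : String :=
  let s := PySem.Str.lower obj_name
  let pris : List Int := pvPris s
  match PySem.List.min? pris (fun x => x) with
  | some m => (PySem.List.pyGet? pvENVS m).getD ""   -- _ENVS[min(pris)]; index is a dict value, always 0..9, so never the default
  | none => "neutral studio surface"

-- ===== PRECONDITION & SPEC =====
def Spec_derive_environment_for_object (obj_name : String) (out : String) : Prop := out = derive_environment_for_object_alt obj_name
instance (obj_name : String) (out : String) : Decidable (Spec_derive_environment_for_object obj_name out) := by unfold Spec_derive_environment_for_object; infer_instance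

-- ===== CLAIM (what is proved, stated in full; the proofs are below) =====
def Claim_equal_derive_environment_for_object : Prop := ∀ (obj_name : String), Dom_derive_environment_for_object obj_name → Spec_derive_environment_for_object obj_name (derive_environment_for_object obj_name)

-- ===== LEMMAS AND PROOFS =====


-- concrete facts about the tables, checked by computation
set_option maxRecDepth 20000 in
set_option maxHeartbeats 2000000 in
lemma lens_nonneg : ∀ L ∈ pvLENS, 0 ≤ L := by decide

set_option maxRecDepth 20000 in
set_option maxHeartbeats 4000000 in
lemma kw_facts : ∀ pr ∈ pvKW.items,
    (PySem.Str.len pr.1 ∈ pvLENS) ∧ 0 ≤ pr.2 ∧ pr.2 ≤ 9 ∧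
    pr.1 ∈ (pvGroups.getD pr.2.toNat ([], "")).1 := by decide

set_option maxRecDepth 20000 in
set_option maxHeartbeats 4000000 in
lemma group_lookup_bool : (List.range 10).all (fun g =>
    ((pvGroups.getD g ([], "")).1).all (fun kw =>
      match PySem.Dict.get? pvKW kw with
      | some p => decide (p ≤ (g : Int))
      | none => false)) = true := by decide

lemma group_lookup : ∀ g : Nat, g < 10 → ∀ kw ∈ (pvGroups.getD g ([], "")).1,
    ∃ p : Int, PySem.Dict.get? pvKW kw = some p ∧ p ≤ (g : Int) := by
  intro g hg kw hkw
  have h := List.all_eq_true.mp group_lookup_bool g (List.mem_range.mpr hg)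
  have h2 := List.all_eq_true.mp h kw hkw
  cases hc : PySem.Dict.get? pvKW kw with
  | none => rw [hc] at h2; exact absurd h2 (by simp)
  | some p => refine ⟨p, rfl, ?_⟩; rw [hc] at h2; exact of_decide_eq_true h2

-- membership in B's priority list ↔ some indexed keyword is an infix of the lowered name
lemma mem_pvPris (t : String) (p : Int) :
    p ∈ pvPris (t) ↔ ∃ kw : String, PySem.Dict.get? pvKW kw = some p ∧
      kw.toList <:+: (t).toList := by
  constructor
  · intro hp
    obtain ⟨i, hi, hp2⟩ := List.mem_flatMap.mp hp
    obtain ⟨L, hL, hget⟩ := List.mem_filterMap.mp hp2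
    refine ⟨_, hget, ?_⟩
    obtain ⟨hi0, _⟩ := PySem.List.mem_pyRange_one.mp hi
    have hL0 := lens_nonneg L hL
    rw [PySem.Str.toList_slice, PySem.Chars.slice_eq_listSlice,
        PySem.List.slice_toNat]
    · exact (((t).toList.drop i.toNat).take_prefix _).isInfix.trans
        ((t).toList.drop_suffix i.toNat).isInfix
    · exact hi0
    · omega
  · rintro ⟨kw, hget, hinf⟩
    obtain ⟨u, v, huv⟩ := hinf
    have hkf := kw_facts _ (PySem.Dict.mem_items_of_get?_eq_some _ hget)
    apply List.mem_flatMap.mpr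
    refine ⟨(u.length : Int), ?_, ?_⟩
    · apply PySem.List.mem_pyRange_one.mpr
      have : u.length ≤ (t).toList.length := by
        rw [← huv]; simp
      have hlen : PySem.Str.len (t) = ((t).toList.length : Int) := by
        simp [pysem]
      omega
    · apply List.mem_filterMap.mpr
      refine ⟨PySem.Str.len kw, hkf.1, ?_⟩
      have hklen : PySem.Str.len kw = (kw.toList.length : Int) := by simp [pysem]
      have hslice : PySem.Str.slice (t) (some (u.length : Int))
          (some ((u.length : Int) + PySem.Str.len kw)) = kw := by
        apply String.toList_inj.mp
        rw [PySem.Str.toList_slice, PySem.Chars.slice_eq_listSlice, hklen,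
            PySem.List.slice_natCast_add, ← huv]
        simp [List.append_assoc]
      rw [hslice]; exact hget
  
-- a priority whose whole group misses the lowered name is not in B's list
lemma not_mem_pris (o : String) (q : Int)
    (hb : ¬ ((pvGroups.getD q.toNat ([], "")).1.any
        (fun kw => PySem.Str.isIn kw (PySem.Str.lower o)) = true)) :
    q ∉ pvPris (PySem.Str.lower o) := by
  intro hq
  obtain ⟨kw, hget, hinf⟩ := (mem_pvPris (PySem.Str.lower o) q).mp hq
  have hkf := kw_facts _ (PySem.Dict.mem_items_of_get?_eq_some _ hget)
  exact hb (List.any_eq_true.mpr ⟨kw, hkf.2.2.2, (PySem.Str.isIn_iff_infix _ _).mpr hinf⟩)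

-- if group g matches and no smaller priority is in B's list, B returns group g's environment
lemma case_g (o : String) (g : Nat) (hg : g < 10)
    (hb : (pvGroups.getD g ([], "")).1.any
        (fun kw => PySem.Str.isIn kw (PySem.Str.lower o)) = true)
    (hprev : ∀ q : Int, 0 ≤ q → q < (g : Int) → q ∉ pvPris (PySem.Str.lower o)) :
    derive_environment_for_object_alt o = (PySem.List.pyGet? pvENVS (g : Int)).getD "" := by
  obtain ⟨kw, hk, hin⟩ := List.any_eq_true.mp hb
  obtain ⟨p, hget, hple⟩ := group_lookup g hg kw hk
  have hpmem : p ∈ pvPris (PySem.Str.lower o) :=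
    (mem_pvPris (PySem.Str.lower o) p).mpr ⟨kw, hget, (PySem.Str.isIn_iff_infix _ _).mp hin⟩
  have hmin : ∀ q ∈ pvPris (PySem.Str.lower o), (g : Int) ≤ q := by
    intro q hqm
    by_contra hlt
    have h0q : 0 ≤ q := (kw_facts _ (PySem.Dict.mem_items_of_get?_eq_some _
      ((mem_pvPris (PySem.Str.lower o) q).mp hqm).choose_spec.1)).2.1
    exact hprev q h0q (by omega) hqm
  have hpg : p = (g : Int) := le_antisymm hple (hmin p hpmem)
  simp only [derive_environment_for_object_alt]
  cases hmq : PySem.List.min? (pvPris (PySem.Str.lower o)) (fun x => x) with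
  | none =>
    rw [(PySem.List.min?_eq_none_iff _ _).mp hmq] at hpmem
    exact absurd hpmem (by simp)
  | some m =>
    have hmg : m = (g : Int) := le_antisymm (hpg ▸ PySem.List.min?_isMin hmq p hpmem)
      (hmin m (PySem.List.min?_mem hmq))
    rw [hmg]

-- if no group matches, B's priority list is empty
lemma pris_nil (o : String)
    (hall : ∀ q : Int, q ∉ pvPris (PySem.Str.lower o)) :
    derive_environment_for_object_alt o = "neutral studio surface" := by
  simp only [derive_environment_for_object_alt]
  rw [(PySem.List.min?_eq_none_iff _ _).mpr (List.eq_nil_iff_forall_not_mem.mpr hall)]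

-- ===== VERDICT (by name: the statement is the Claim_ definition above) =====
theorem derive_environment_for_object_spec : Claim_equal_derive_environment_for_object := by
  intro o _
  unfold Spec_derive_environment_for_object
  simp only [derive_environment_for_object]
  split_ifs with h0 h1 h2 h3 h4 h5 h6 h7 h8 h9
  · exact ((case_g o 0 (by omega) h0 (by intro q hq0 hqg; omega)).trans (by decide)).symm
  · exact ((case_g o 1 (by omega) h1 (by intro q hq0 hqg; have hq' : q = 0 := (by omega); rcases hq' with rfl; exacts [not_mem_pris o 0 h0])).trans (by decide)).symm
  · exact ((case_g o 2 (by omega) h2 (by intro q hq0 hqg; have hq' : q = 0 ∨ q = 1 := (by omega); rcases hq' with rfl | rfl; exacts [not_mem_pris o 0 h0, not_mem_pris o 1 h1])).trans (by decide)).symm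
  · exact ((case_g o 3 (by omega) h3 (by intro q hq0 hqg; have hq' : q = 0 ∨ q = 1 ∨ q = 2 := (by omega); rcases hq' with rfl | rfl | rfl; exacts [not_mem_pris o 0 h0, not_mem_pris o 1 h1, not_mem_pris o 2 h2])).trans (by decide)).symm
  · exact ((case_g o 4 (by omega) h4 (by intro q hq0 hqg; have hq' : q = 0 ∨ q = 1 ∨ q = 2 ∨ q = 3 := (by omega); rcases hq' with rfl | rfl | rfl | rfl; exacts [not_mem_pris o 0 h0, not_mem_pris o 1 h1, not_mem_pris o 2 h2, not_mem_pris o 3 h3])).trans (by decide)).symm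
  · exact ((case_g o 5 (by omega) h5 (by intro q hq0 hqg; have hq' : q = 0 ∨ q = 1 ∨ q = 2 ∨ q = 3 ∨ q = 4 := (by omega); rcases hq' with rfl | rfl | rfl | rfl | rfl; exacts [not_mem_pris o 0 h0, not_mem_pris o 1 h1, not_mem_pris o 2 h2, not_mem_pris o 3 h3, not_mem_pris o 4 h4])).trans (by decide)).symm
  · exact ((case_g o 6 (by omega) h6 (by intro q hq0 hqg; have hq' : q = 0 ∨ q = 1 ∨ q = 2 ∨ q = 3 ∨ q = 4 ∨ q = 5 := (by omega); rcases hq' with rfl | rfl | rfl | rfl | rfl | rfl; exacts [not_mem_pris o 0 h0, not_mem_pris o 1 h1, not_mem_pris o 2 h2, not_mem_pris o 3 h3, not_mem_pris o 4 h4, not_mem_pris o 5 h5])).trans (by decide)).symm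
  · exact ((case_g o 7 (by omega) h7 (by intro q hq0 hqg; have hq' : q = 0 ∨ q = 1 ∨ q = 2 ∨ q = 3 ∨ q = 4 ∨ q = 5 ∨ q = 6 := (by omega); rcases hq' with rfl | rfl | rfl | rfl | rfl | rfl | rfl; exacts [not_mem_pris o 0 h0, not_mem_pris o 1 h1, not_mem_pris o 2 h2, not_mem_pris o 3 h3, not_mem_pris o 4 h4, not_mem_pris o 5 h5, not_mem_pris o 6 h6])).trans (by decide)).symm
  · exact ((case_g o 8 (by omega) h8 (by intro q hq0 hqg; have hq' : q = 0 ∨ q = 1 ∨ q = 2 ∨ q = 3 ∨ q = 4 ∨ q = 5 ∨ q = 6 ∨ q = 7 := (by omega); rcases hq' with rfl | rfl | rfl | rfl | rfl | rfl | rfl | rfl; exacts [not_mem_pris o 0 h0, not_mem_pris o 1 h1, not_mem_pris o 2 h2, not_mem_pris o 3 h3, not_mem_pris o 4 h4, not_mem_pris o 5 h5, not_mem_pris o 6 h6, not_mem_pris o 7 h7])).trans (by decide)).symm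
  · exact ((case_g o 9 (by omega) h9 (by intro q hq0 hqg; have hq' : q = 0 ∨ q = 1 ∨ q = 2 ∨ q = 3 ∨ q = 4 ∨ q = 5 ∨ q = 6 ∨ q = 7 ∨ q = 8 := (by omega); rcases hq' with rfl | rfl | rfl | rfl | rfl | rfl | rfl | rfl | rfl; exacts [not_mem_pris o 0 h0, not_mem_pris o 1 h1, not_mem_pris o 2 h2, not_mem_pris o 3 h3, not_mem_pris o 4 h4, not_mem_pris o 5 h5, not_mem_pris o 6 h6, not_mem_pris o 7 h7, not_mem_pris o 8 h8])).trans (by decide)).symm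
  · refine (pris_nil o ?_).symm
    intro q hq
    obtain ⟨kw, hget, hinf⟩ := (mem_pvPris _ q).mp hq
    obtain ⟨-, h0q, hq9, hmem⟩ := kw_facts _ (PySem.Dict.mem_items_of_get?_eq_some _ hget)
    have hin : PySem.Str.isIn kw (PySem.Str.lower o) = true :=
      (PySem.Str.isIn_iff_infix _ _).mpr hinf
    have hq' : q = 0 ∨ q = 1 ∨ q = 2 ∨ q = 3 ∨ q = 4 ∨ q = 5 ∨ q = 6 ∨ q = 7 ∨ q = 8 ∨ q = 9 := by omega
    rcases hq' with rfl | rfl | rfl | rfl | rfl | rfl | rfl | rfl | rfl | rfl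
    exacts [h0 (List.any_eq_true.mpr ⟨kw, hmem, hin⟩), h1 (List.any_eq_true.mpr ⟨kw, hmem, hin⟩),
      h2 (List.any_eq_true.mpr ⟨kw, hmem, hin⟩), h3 (List.any_eq_true.mpr ⟨kw, hmem, hin⟩),
      h4 (List.any_eq_true.mpr ⟨kw, hmem, hin⟩), h5 (List.any_eq_true.mpr ⟨kw, hmem, hin⟩),
      h6 (List.any_eq_true.mpr ⟨kw, hmem, hin⟩), h7 (List.any_eq_true.mpr ⟨kw, hmem, hin⟩),
      h8 (List.any_eq_true.mpr ⟨kw, hmem, hin⟩), h9 (List.any_eq_true.mpr ⟨kw, hmem, hin⟩)]
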